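-- pv_equiv track=rewrite | github.com/Ol5xHd/tasks | hh_school/task1/main.py | string_to_dict
-- ===== SOURCE A (Python) =====
-- def string_to_dict(string: str) -> dict:
-- 	result = {}
-- 	for ind in range(0, len(string)):
-- 		if string[ind] in result:
-- 			result[string[ind]].append(ind)
-- 		else:
-- 			result[string[ind]] = [ind]
-- 	return result
-- ===== SOURCE B (Python) =====
-- def string_to_dict(string: str) -> dict:
-- 	distinct = list(dict.fromkeys(string))
-- 	return {c: [i for i, ch in enumerate(string) if ch == c] for c in distinct}
-- ===== Notes on version B (the rewrite author's own statement) =====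
-- stated objective: alternative
-- what changed: Instead of A's single pass that appends each index into a growing dict, B first computes the distinct characters in first-occurrence order (dict.fromkeys) and then builds the dict by one comprehension per distinct character, scanning the string once per character to collect its indices.
import Mathlib
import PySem

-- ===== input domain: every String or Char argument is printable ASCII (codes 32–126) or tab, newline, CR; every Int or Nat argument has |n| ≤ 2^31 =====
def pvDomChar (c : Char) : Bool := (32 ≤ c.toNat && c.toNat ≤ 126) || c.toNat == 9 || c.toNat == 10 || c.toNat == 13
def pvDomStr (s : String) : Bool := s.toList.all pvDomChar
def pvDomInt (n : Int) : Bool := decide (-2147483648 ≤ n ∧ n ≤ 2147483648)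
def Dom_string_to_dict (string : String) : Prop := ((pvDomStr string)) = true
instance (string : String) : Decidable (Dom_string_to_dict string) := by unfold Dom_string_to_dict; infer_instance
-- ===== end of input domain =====

-- B replaces A's single append-as-you-go dict pass by a per-distinct-character gather (same result, same key order); objective: alternative decomposition.

-- ===== PORT A =====
-- for ind in range(len(string)): iterated here as a fold over the (index, char) pairs;
-- string[ind] is a 1-character Python str, ported as String.ofList [c].
def string_to_dict (string : String) : List (String × List Int) :=
  ((PySem.List.enumerate string.toList 0).foldl
    (fun result p =>
      if result.contains (String.ofList [p.2]) then
        result.modify (String.ofList [p.2]) [] (fun v => v ++ [p.1])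
      else
        result.insert (String.ofList [p.2]) [p.1])
    PySem.Dict.empty).items

-- ===== PORT B =====
-- list(dict.fromkeys(string)) = PySem.List.dedup; then one inner scan per distinct character.
def string_to_dict_alt (string : String) : List (String × List Int) :=
  (PySem.List.dedup string.toList).map
    (fun c => (String.ofList [c],
      ((PySem.List.enumerate string.toList 0).filter (fun p => p.2 == c)).map (fun p => p.1)))

-- ===== PRECONDITION & SPEC =====
def Spec_string_to_dict (string : String) (out : List (String × List Int)) : Prop := out = string_to_dict_alt string
instance (string : String) (out : List (String × List Int)) : Decidable (Spec_string_to_dict string out) := by unfold Spec_string_to_dict; infer_instance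

-- ===== CLAIM (what is proved, stated in full; the proofs are below) =====
def Claim_equal_string_to_dict : Prop := ∀ (string : String), Dom_string_to_dict string → Spec_string_to_dict string (string_to_dict string)

-- ===== LEMMAS AND PROOFS =====

-- the single-character key constructor
def sdKey (c : Char) : String := String.ofList [c]

theorem sdKey_inj : Function.Injective sdKey := by
  intro a b h
  have := congrArg String.toList h
  simpa [sdKey] using this

-- A's branch (present: append; absent: fresh singleton) is exactly one dict.modify
theorem sd_step_eq (d : PySem.Dict String (List Int)) (k : String) (v : Int) :
    (if d.contains k then d.modify k [] (fun xs => xs ++ [v]) else d.insert k [v])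
      = d.modify k [] (fun xs => xs ++ [v]) := by
  by_cases h : d.contains k
  · simp [h]
  · simp [h, PySem.Dict.insert, PySem.Dict.modify,
      PySem.Dict.getD, (PySem.Dict.get?_eq_none_iff_contains d k).2 (by simpa using h)]

-- Set.ofList commutes with the injective map sdKey
theorem sd_ofList_map (l : List Char) :
    PySem.Set.ofList (l.map sdKey) = (PySem.Set.ofList l).map sdKey := by
  induction l with
  | nil => rfl
  | cons x xs ih =>
    simp only [List.map_cons, PySem.Set.ofList_cons, ih, PySem.Set.discard]
    congr 1
    rw [List.filter_map]
    refine congrArg _ (List.filter_congr fun y _ => ?_)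
    simp [Function.comp, sdKey_inj.eq_iff]

theorem sd_main (s : String) : string_to_dict s = string_to_dict_alt s := by
  unfold string_to_dict string_to_dict_alt
  have hbody : (fun (result : PySem.Dict String (List Int)) (p : Int × Char) =>
      if result.contains (String.ofList [p.2]) then
        result.modify (String.ofList [p.2]) [] (fun v => v ++ [p.1])
      else
        result.insert (String.ofList [p.2]) [p.1])
      = (fun result p => result.modify (sdKey p.2) [] (fun v => v ++ [p.1])) := by
    funext d p
    exact sd_step_eq d (String.ofList [p.2]) p.1
  rw [hbody]
  set e := PySem.List.enumerate s.toList 0 with he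
  -- view A's loop as a grouping fold over (key, value) pairs
  have hfold : e.foldl (fun result p => result.modify (sdKey p.2) [] (fun v => v ++ [p.1]))
        PySem.Dict.empty
      = (e.map (fun p => (sdKey p.2, p.1))).foldl
          (fun d q => d.modify q.1 [] (fun v => v ++ [q.2])) PySem.Dict.empty := by
    rw [List.foldl_map]
  rw [hfold]
  set l' := e.map (fun p => (sdKey p.2, p.1)) with hl'
  set D := l'.foldl (fun d q => d.modify q.1 [] (fun v => v ++ [q.2])) PySem.Dict.empty with hD
  have hnd : D.keys.Nodup := by
    rw [hD]
    exact PySem.Dict.nodup_keys_foldl_modify_key l' (fun q => q.1) []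
      (fun d q => fun v => v ++ [q.2]) PySem.Dict.empty (by simp [PySem.Dict.empty, PySem.Dict.keys])
  rw [PySem.Dict.items_eq_map_keys D hnd []]
  have hkeys : D.keys = (PySem.List.dedup s.toList).map sdKey := by
    rw [hD]
    rw [PySem.Dict.keys_foldl_modify_key]
    have h1 : l'.map (fun q => q.1) = s.toList.map sdKey := by
      rw [hl', List.map_map]
      have : (e.map (fun p => p.2)).map sdKey = s.toList.map sdKey := by
        rw [he, PySem.List.map_snd_enumerate]
      simpa [Function.comp] using this
    have hemp : (PySem.Dict.empty : PySem.Dict String (List Int)).keys = [] := by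
      simp [PySem.Dict.empty, PySem.Dict.keys]
    rw [hemp, h1, PySem.Set.update_nil_left, sd_ofList_map, PySem.List.dedup_eq_ofList]
  rw [hkeys, List.map_map]
  refine List.map_congr_left fun c _ => ?_
  simp only [Function.comp]
  have hgetD : D.getD (sdKey c) [] =
      (e.filter (fun p => p.2 == c)).map (fun p => p.1) := by
    rw [hD, PySem.Dict.getD_foldl_modify_append]
    have hfil : l'.filter (fun q => q.1 == sdKey c) =
        (e.filter (fun p => p.2 == c)).map (fun p => (sdKey p.2, p.1)) := by
      rw [hl', List.filter_map]
      refine congrArg _ (List.filter_congr fun p _ => ?_)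
      simp [Function.comp, sdKey_inj.eq_iff]
    rw [hfil, List.map_map]
    simp [PySem.Dict.empty, PySem.Dict.getD, PySem.Dict.get?, Function.comp]
  rw [hgetD]
  rfl

-- ===== VERDICT (by name: the statement is the Claim_ definition above) =====
theorem string_to_dict_spec : Claim_equal_string_to_dict := by
  intro s _
  exact sd_main s
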